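-- pv_equiv track=rewrite | github.com/nickmoop/HoMM3_browser_clone | heroes/calc.py | possibleCellsForNotFlying
-- ===== SOURCE A (Python) =====
-- def possibleCellsForNotFlying(possible_cells, unit_coords, unit_speed):
--     tmp = [unit_coords]
--     to_return = [unit_coords]
--
--     for i in range(0, unit_speed):
--         cells_to_add = []
--         for coords in tmp:
--             current_cells = nearestCells(coords)
--
--             for cell in list(current_cells):
--                 if (cell in possible_cells) and not (cell in cells_to_add) and not (cell in to_return):
--                     cells_to_add.append(cell)
--
--         to_return += cells_to_add
--
--         tmp = cells_to_add
--
--     return to_return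
--
-- def nearestCells(cell_coords):
--     cells = []
--     x = cell_coords[0]
--     y = cell_coords[1]
--
--     cells.append([x - 1, y])
--     cells.append([x + 1, y])
--
--     if (y % 2 == 0):
--         add_x = 1
--
--     if (y % 2 == 1):
--         add_x = -1
--
--     cells.append([x, y - 1])
--     cells.append([x + add_x, y - 1])
--     cells.append([x, y + 1])
--     cells.append([x + add_x, y + 1])
--
--     for coords in list(cells):
--         if coords[0] < 0 or coords[0] > 14 or coords[1] < 0 or coords[1] > 10:
--             cells.remove(coords)
--
--     return cells
-- ===== SOURCE B (Python) =====
-- def nearestCells(cell_coords):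
--     cells = []
--     x = cell_coords[0]
--     y = cell_coords[1]
--
--     cells.append([x - 1, y])
--     cells.append([x + 1, y])
--
--     if (y % 2 == 0):
--         add_x = 1
--
--     if (y % 2 == 1):
--         add_x = -1
--
--     cells.append([x, y - 1])
--     cells.append([x + add_x, y - 1])
--     cells.append([x, y + 1])
--     cells.append([x + add_x, y + 1])
--
--     for coords in list(cells):
--         if coords[0] < 0 or coords[0] > 14 or coords[1] < 0 or coords[1] > 10:
--             cells.remove(coords)
--
--     return cells
--
--
-- def possibleCellsForNotFlying(possible_cells, unit_coords, unit_speed):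
--     # Index the allowed cells once, then generate the reachable region as a
--     # recursive sequence of levels, stopping as soon as a level is empty
--     # (instead of A's fixed range(unit_speed) loop with linear list scans).
--     allowed = {tuple(c) for c in possible_cells}
--
--     def level_after(frontier, seen):
--         candidates = [n for c in frontier for n in nearestCells(c)
--                       if tuple(n) in allowed]
--         nxt = []
--         for n in candidates:
--             t = tuple(n)
--             if t not in seen:
--                 seen.add(t)
--                 nxt.append(n)
--         return nxt
--
--     def walk(frontier, seen, budget):
--         if budget <= 0 or not frontier:
--             return []
--         nxt = level_after(frontier, seen)
--         return nxt + walk(nxt, seen, budget - 1)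
--
--     return [unit_coords] + walk([unit_coords], {tuple(unit_coords)}, unit_speed)
-- ===== Notes on version B (the rewrite author's own statement) =====
-- stated objective: alternative
-- what changed: Replaces A's fixed range(unit_speed) loop with nested linear list-membership scans by a set index over possible_cells built once, a recursive per-level expansion (flat candidate comprehension + one dedup pass over a seen set), and an early stop as soon as a level is empty.
import Mathlib
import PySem

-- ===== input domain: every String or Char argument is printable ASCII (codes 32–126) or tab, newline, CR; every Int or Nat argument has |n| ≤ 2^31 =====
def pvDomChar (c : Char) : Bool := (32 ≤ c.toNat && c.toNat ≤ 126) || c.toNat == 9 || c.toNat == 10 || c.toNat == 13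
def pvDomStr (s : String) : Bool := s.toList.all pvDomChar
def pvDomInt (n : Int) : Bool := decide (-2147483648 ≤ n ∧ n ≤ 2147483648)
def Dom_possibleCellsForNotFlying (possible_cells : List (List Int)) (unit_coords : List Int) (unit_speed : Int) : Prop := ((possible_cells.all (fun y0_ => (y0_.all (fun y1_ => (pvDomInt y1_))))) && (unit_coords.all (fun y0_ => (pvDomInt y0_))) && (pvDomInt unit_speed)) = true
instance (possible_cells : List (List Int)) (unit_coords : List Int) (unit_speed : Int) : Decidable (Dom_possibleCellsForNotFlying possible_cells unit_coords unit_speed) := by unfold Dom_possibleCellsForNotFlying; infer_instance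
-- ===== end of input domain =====

-- B replaces A's fixed range(unit_speed) loop with its linear list-membership scans by a
-- set index over possible_cells built once, a recursive level expansion, and an early
-- stop when a level comes out empty; same return value.

-- ===== PORT A =====
-- helper nearestCells, shared verbatim by both Pythons (Source A and Source B contain the same
-- definition). pyGetD … 0 totalizes cell_coords[0]/[1]; Pre_ excludes the IndexError inputs.
def nearestCells (cell_coords : List Int) : List (List Int) :=
  let x := PySem.List.pyGetD cell_coords 0 0
  let y := PySem.List.pyGetD cell_coords 1 0
  let add_x : Int := if PySem.Int.mod y 2 = 0 then 1 else -1
  let cells : List (List Int) :=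
    [[x - 1, y], [x + 1, y], [x, y - 1], [x + add_x, y - 1], [x, y + 1], [x + add_x, y + 1]]
  -- for coords in list(cells): if out of bounds: cells.remove(coords)
  cells.foldl
    (fun cs coords =>
      if PySem.List.pyGetD coords 0 0 < 0 ∨ PySem.List.pyGetD coords 0 0 > 14 ∨
         PySem.List.pyGetD coords 1 0 < 0 ∨ PySem.List.pyGetD coords 1 0 > 10 then
        (PySem.List.remove? cs coords).getD cs
      else cs)
    cells

-- body of A's innermost `for cell in list(current_cells)` loop
def pvStepCell (pcs ret cta : List (List Int)) (cell : List Int) : List (List Int) :=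
  if cell ∈ pcs ∧ cell ∉ cta ∧ cell ∉ ret then cta ++ [cell] else cta

-- A's middle loop: fold the frontier `tmp`, accumulating cells_to_add from cta0
def pvLevel (pcs ret : List (List Int)) (cta0 tmp : List (List Int)) : List (List Int) :=
  tmp.foldl (fun cta coords => (nearestCells coords).foldl (pvStepCell pcs ret) cta) cta0

def possibleCellsForNotFlying (possible_cells : List (List Int)) (unit_coords : List Int) (unit_speed : Int) : List (List Int) :=
  -- state = (tmp, to_return)
  ((PySem.List.pyRange 0 unit_speed 1).foldl
    (fun st _ =>
      let cells_to_add := pvLevel possible_cells st.2 [] st.1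
      (cells_to_add, st.2 ++ cells_to_add))
    ([unit_coords], [unit_coords])).2

-- ===== PORT B =====
-- body of B's `for n in candidates` dedup loop; state = (nxt, seen)
def pvDedupStep (st : List (List Int) × PySem.Set (List Int)) (n : List Int) :
    List (List Int) × PySem.Set (List Int) :=
  if PySem.Set.contains st.2 n then st else (st.1 ++ [n], PySem.Set.add st.2 n)

-- B's level_after: flat candidate comprehension filtered by the allowed index, then dedup
def pvLevelAfter (allowed : PySem.Set (List Int)) (frontier : List (List Int))
    (seen : PySem.Set (List Int)) : List (List Int) × PySem.Set (List Int) :=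
  let candidates := frontier.flatMap
    (fun c => (nearestCells c).filter (fun n => PySem.Set.contains allowed n))
  candidates.foldl pvDedupStep ([], seen)

-- B's recursive walk. The Nat fuel is a totality guard only: levels are pairwise-disjoint
-- subsets of possible_cells, so after possible_cells.length + 1 levels one is empty and
-- the recursion stops, exactly as Source B's recursion does.
def pvWalk (allowed : PySem.Set (List Int)) :
    Nat → List (List Int) → PySem.Set (List Int) → Int → List (List Int)
  | 0, _, _, _ => []
  | f + 1, frontier, seen, budget =>
    if budget ≤ 0 ∨ frontier = [] then []
    else
      let st := pvLevelAfter allowed frontier seen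
      st.1 ++ pvWalk allowed f st.1 st.2 (budget - 1)

def possibleCellsForNotFlying_alt (possible_cells : List (List Int)) (unit_coords : List Int) (unit_speed : Int) : List (List Int) :=
  [unit_coords] ++
    pvWalk (PySem.Set.ofList possible_cells) (possible_cells.length + 2)
      [unit_coords] (PySem.Set.ofList [unit_coords]) unit_speed

-- ===== PRECONDITION & SPEC =====
-- Pre_ excludes exactly the IndexError inputs: with unit_speed ≥ 1 Python evaluates
-- unit_coords[0] and unit_coords[1], raising when unit_coords has fewer than 2 elements.
def Pre_possibleCellsForNotFlying (possible_cells : List (List Int)) (unit_coords : List Int) (unit_speed : Int) : Prop :=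
  1 ≤ unit_speed → 2 ≤ unit_coords.length
instance (possible_cells : List (List Int)) (unit_coords : List Int) (unit_speed : Int) : Decidable (Pre_possibleCellsForNotFlying possible_cells unit_coords unit_speed) := by unfold Pre_possibleCellsForNotFlying; infer_instance

def pvWitness_possibleCellsForNotFlying : List (List Int) × List Int × Int :=
  ([[1, 0], [0, 1], [1, 1]], [0, 0], 2)

def Spec_possibleCellsForNotFlying (possible_cells : List (List Int)) (unit_coords : List Int) (unit_speed : Int) (out : List (List Int)) : Prop := out = possibleCellsForNotFlying_alt possible_cells unit_coords unit_speed
instance (possible_cells : List (List Int)) (unit_coords : List Int) (unit_speed : Int) (out : List (List Int)) : Decidable (Spec_possibleCellsForNotFlying possible_cells unit_coords unit_speed out) := by unfold Spec_possibleCellsForNotFlying; infer_instance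

-- ===== CLAIM (what is proved, stated in full; the proofs are below) =====
def Claim_equal_possibleCellsForNotFlying : Prop := ∀ (possible_cells : List (List Int)) (unit_coords : List Int) (unit_speed : Int), Dom_possibleCellsForNotFlying possible_cells unit_coords unit_speed → Pre_possibleCellsForNotFlying possible_cells unit_coords unit_speed → Spec_possibleCellsForNotFlying possible_cells unit_coords unit_speed (possibleCellsForNotFlying possible_cells unit_coords unit_speed)

-- ===== LEMMAS AND PROOFS =====

-- A's outer `for i in range(0, unit_speed)` loop, restated as recursion on the
-- number of remaining levels (proof vehicle only).
def pvLoopA (pcs : List (List Int)) : Nat → List (List Int) → List (List Int) → List (List Int)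
  | 0, _, ret => ret
  | n + 1, tmp, ret => pvLoopA pcs n (pvLevel pcs ret [] tmp) (ret ++ pvLevel pcs ret [] tmp)

lemma pvA_eq_loop (pcs : List (List Int)) :
    ∀ (l : List Int) (tmp ret : List (List Int)),
    (l.foldl (fun st (_ : Int) =>
        (pvLevel pcs st.2 [] st.1, st.2 ++ pvLevel pcs st.2 [] st.1)) (tmp, ret)).2
      = pvLoopA pcs l.length tmp ret := by
  intro l
  induction l with
  | nil => intro tmp ret; rfl
  | cons a l ih => intro tmp ret; simpa [pvLoopA] using ih _ _

lemma pvLoopA_nil (pcs : List (List Int)) : ∀ (n : Nat) (ret : List (List Int)),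
    pvLoopA pcs n [] ret = ret := by
  intro n
  induction n with
  | zero => intro ret; rfl
  | succ n ih =>
    intro ret
    have h : pvLevel pcs ret [] [] = [] := rfl
    simp only [pvLoopA, h, List.append_nil]
    exact ih ret

lemma pvWalk_nil (allowed : PySem.Set (List Int)) :
    ∀ (fuel : Nat) (seen : PySem.Set (List Int)) (b : Int),
    pvWalk allowed fuel [] seen b = [] := by
  intro fuel seen b
  cases fuel with
  | zero => rfl
  | succ f => simp [pvWalk]

-- number of distinct cells of pcs not yet output (the fuel/credit measure)
def pvFree (pcs l : List (List Int)) : Nat :=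
  ((PySem.List.dedup pcs).filter (fun x => decide (x ∉ l))).length

lemma pvFilter_len_succ {α : Type} [DecidableEq α] :
    ∀ (L : List α) (a : α), L.Nodup → a ∈ L → ∀ (l : List α), a ∉ l →
    (L.filter (fun x => decide (x ∉ l))).length
      = (L.filter (fun x => decide (x ∉ l ++ [a]))).length + 1 := by
  intro L
  induction L with
  | nil => intro a _ ha; exact absurd ha (List.not_mem_nil)
  | cons b L ih =>
    intro a hnd haL l hal
    have hndL := (List.nodup_cons.mp hnd).2
    have hbnL := (List.nodup_cons.mp hnd).1
    rcases List.mem_cons.mp haL with hba | haL'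
    · have haL2 : a ∉ L := by rw [hba]; exact hbnL
      rw [← hba]
      have h1 : decide (a ∉ l) = true := by simp [hal]
      have h2 : decide (a ∉ l ++ [a]) = false := by simp
      have hcongr : L.filter (fun x => decide (x ∉ l))
          = L.filter (fun x => decide (x ∉ l ++ [a])) := by
        apply List.filter_congr
        intro x hx
        have hxa : x ≠ a := fun h => haL2 (h ▸ hx)
        simp [List.mem_append, hxa]
      simp only [List.filter_cons, h1, h2, hcongr]
      simp
    · by_cases hbl : b ∈ l
      · have h1 : decide (b ∉ l) = false := by simp [hbl]
        have h2 : decide (b ∉ l ++ [a]) = false := by simp [List.mem_append, hbl]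
        simp only [List.filter_cons, h1, h2]
        exact ih a hndL haL' l hal
      · have hba : b ≠ a := fun h => hbnL (h ▸ haL')
        have h1 : decide (b ∉ l) = true := by simp [hbl]
        have h2 : decide (b ∉ l ++ [a]) = true := by simp [List.mem_append, hbl, hba]
        simp only [List.filter_cons, h1, h2, if_true, List.length_cons]
        rw [ih a hndL haL' l hal]

lemma pvFree_append (pcs l : List (List Int)) (a : List Int)
    (ha : a ∈ pcs) (hal : a ∉ l) : pvFree pcs l = pvFree pcs (l ++ [a]) + 1 := by
  unfold pvFree
  have h := pvFilter_len_succ (PySem.List.dedup pcs) a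
    (by simpa using PySem.List.nodup_dedup pcs) (by rw [PySem.List.mem_dedup]; exact ha) l hal
  simpa using h

lemma pvFree_le (pcs l : List (List Int)) : pvFree pcs l ≤ pcs.length := by
  have h1 : pvFree pcs l ≤ (PySem.List.dedup pcs).length := List.length_filter_le _ _
  have h2 : ∀ (xs : List (List Int)) (s : PySem.Set (List Int)),
      (xs.foldl PySem.Set.add s).length ≤ s.length + xs.length := by
    intro xs
    induction xs with
    | nil => intro s; simp
    | cons x xs ih =>
      intro s
      have := ih (PySem.Set.add s x)
      have hadd : (PySem.Set.add s x).length ≤ s.length + 1 := by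
        simp only [PySem.Set.add]; split <;> simp
      simp only [List.foldl_cons]
      calc ((xs.foldl PySem.Set.add (PySem.Set.add s x)).length)
          ≤ (PySem.Set.add s x).length + xs.length := this
        _ ≤ s.length + 1 + xs.length := by omega
        _ = s.length + (x :: xs).length := by simp; omega
  have h3 : (PySem.List.dedup pcs).length ≤ pcs.length := by
    rw [PySem.List.dedup_eq_ofList, PySem.Set.ofList_eq_foldl]
    simpa using h2 pcs []
  omega

-- B's dedup fold over the filtered neighbours of ONE frontier cell tracks A's
-- innermost fold with pvStepCell, plus seen-set and free-count bookkeeping.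
lemma pvInner (pcs ret : List (List Int)) :
    ∀ (ns acc : List (List Int)) (seen : PySem.Set (List Int)),
    (∀ x, x ∈ seen ↔ x ∈ ret ++ acc) →
    ((ns.filter (fun n => PySem.Set.contains (PySem.Set.ofList pcs) n)).foldl
        pvDedupStep (acc, seen)).1
      = ns.foldl (pvStepCell pcs ret) acc ∧
    (∀ x, x ∈ ((ns.filter (fun n => PySem.Set.contains (PySem.Set.ofList pcs) n)).foldl
        pvDedupStep (acc, seen)).2 ↔ x ∈ ret ++ ns.foldl (pvStepCell pcs ret) acc) ∧
    pvFree pcs (ret ++ acc) + acc.length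
      = pvFree pcs (ret ++ ns.foldl (pvStepCell pcs ret) acc)
        + (ns.foldl (pvStepCell pcs ret) acc).length := by
  intro ns
  induction ns with
  | nil => intro acc seen hv; exact ⟨rfl, hv, rfl⟩
  | cons n ns ih =>
    intro acc seen hv
    by_cases hp : n ∈ pcs
    · have hfilter : (n :: ns).filter (fun n => PySem.Set.contains (PySem.Set.ofList pcs) n)
          = n :: ns.filter (fun n => PySem.Set.contains (PySem.Set.ofList pcs) n) := by
        simp [hp]
      by_cases hc : n ∉ acc ∧ n ∉ ret
      · have hnseen : n ∉ seen := by
          rw [hv]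
          simp [List.mem_append]
          tauto
        have hB : pvDedupStep (acc, seen) n = (acc ++ [n], PySem.Set.add seen n) := by
          unfold pvDedupStep
          rw [if_neg (by simpa using hnseen)]
        have hA : pvStepCell pcs ret acc n = acc ++ [n] := by
          unfold pvStepCell
          exact if_pos ⟨hp, hc.1, hc.2⟩
        have hv' : ∀ x, x ∈ PySem.Set.add seen n ↔ x ∈ ret ++ (acc ++ [n]) := by
          intro x
          rw [PySem.Set.mem_add, hv]
          simp [List.mem_append]
          tauto
        obtain ⟨i1, i2, i3⟩ := ih (acc ++ [n]) (PySem.Set.add seen n) hv'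
        refine ⟨?_, ?_, ?_⟩
        · rw [hfilter]; simp only [List.foldl_cons, hB, hA]; exact i1
        · rw [hfilter]; simp only [List.foldl_cons, hB, hA]; exact i2
        · have hfree : pvFree pcs (ret ++ acc) = pvFree pcs ((ret ++ acc) ++ [n]) + 1 :=
            pvFree_append pcs (ret ++ acc) n hp (by simp [List.mem_append]; tauto)
          rw [List.append_assoc] at hfree
          simp only [List.foldl_cons, hA]
          simp only [List.length_append, List.length_cons, List.length_nil] at i3 ⊢
          omega
      · have hseen : n ∈ seen := by
          rw [hv]
          simp [List.mem_append]
          tauto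
        have hB : pvDedupStep (acc, seen) n = (acc, seen) := by
          unfold pvDedupStep
          rw [if_pos (by simpa using hseen)]
        have hA : pvStepCell pcs ret acc n = acc := by
          unfold pvStepCell
          rw [if_neg (by tauto)]
        obtain ⟨i1, i2, i3⟩ := ih acc seen hv
        refine ⟨?_, ?_, ?_⟩
        · rw [hfilter]; simp only [List.foldl_cons, hB, hA]; exact i1
        · rw [hfilter]; simp only [List.foldl_cons, hB, hA]; exact i2
        · simp only [List.foldl_cons, hA]; exact i3
    · have hfilter : (n :: ns).filter (fun n => PySem.Set.contains (PySem.Set.ofList pcs) n)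
          = ns.filter (fun n => PySem.Set.contains (PySem.Set.ofList pcs) n) := by
        simp [hp]
      have hA : pvStepCell pcs ret acc n = acc := by
        unfold pvStepCell
        rw [if_neg (by tauto)]
      obtain ⟨i1, i2, i3⟩ := ih acc seen hv
      refine ⟨?_, ?_, ?_⟩
      · rw [hfilter]; simp only [List.foldl_cons, hA]; exact i1
      · rw [hfilter]; simp only [List.foldl_cons, hA]; exact i2
      · simp only [List.foldl_cons, hA]; exact i3

-- B's whole level (flatMap over the frontier, then dedup) tracks A's pvLevel.
lemma pvLevelAfter_eq (pcs ret : List (List Int)) :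
    ∀ (frontier acc : List (List Int)) (seen : PySem.Set (List Int)),
    (∀ x, x ∈ seen ↔ x ∈ ret ++ acc) →
    ((frontier.flatMap
        (fun c => (nearestCells c).filter (fun n => PySem.Set.contains (PySem.Set.ofList pcs) n))).foldl
        pvDedupStep (acc, seen)).1
      = pvLevel pcs ret acc frontier ∧
    (∀ x, x ∈ ((frontier.flatMap
        (fun c => (nearestCells c).filter (fun n => PySem.Set.contains (PySem.Set.ofList pcs) n))).foldl
        pvDedupStep (acc, seen)).2 ↔ x ∈ ret ++ pvLevel pcs ret acc frontier) ∧
    pvFree pcs (ret ++ acc) + acc.length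
      = pvFree pcs (ret ++ pvLevel pcs ret acc frontier) + (pvLevel pcs ret acc frontier).length := by
  intro frontier
  induction frontier with
  | nil => intro acc seen hv; exact ⟨rfl, hv, rfl⟩
  | cons c fr ih =>
    intro acc seen hv
    obtain ⟨i1, i2, i3⟩ := pvInner pcs ret (nearestCells c) acc seen hv
    have hsplit :
        ((c :: fr).flatMap
          (fun c => (nearestCells c).filter (fun n => PySem.Set.contains (PySem.Set.ofList pcs) n))).foldl
          pvDedupStep (acc, seen)
        = (fr.flatMap
            (fun c => (nearestCells c).filter (fun n => PySem.Set.contains (PySem.Set.ofList pcs) n))).foldl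
            pvDedupStep
            (((nearestCells c).filter (fun n => PySem.Set.contains (PySem.Set.ofList pcs) n)).foldl
              pvDedupStep (acc, seen)) := by
      simp [List.flatMap_cons, List.foldl_append]
    set st := ((nearestCells c).filter (fun n => PySem.Set.contains (PySem.Set.ofList pcs) n)).foldl
      pvDedupStep (acc, seen) with hst
    have hstpair : st = (st.1, st.2) := rfl
    have hlevel : pvLevel pcs ret acc (c :: fr)
        = pvLevel pcs ret ((nearestCells c).foldl (pvStepCell pcs ret) acc) fr := rfl
    obtain ⟨j1, j2, j3⟩ := ih ((nearestCells c).foldl (pvStepCell pcs ret) acc) st.2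
      i2
    rw [hsplit, hstpair, i1, hlevel]
    exact ⟨j1, j2, by omega⟩

-- main invariant: B's recursive walk continues like A's remaining levels.
lemma pvMain (pcs : List (List Int)) :
    ∀ (fuel : Nat) (b : Int) (frontier ret : List (List Int)) (seen : PySem.Set (List Int)),
    (∀ x, x ∈ seen ↔ x ∈ ret) →
    pvFree pcs ret + 1 ≤ fuel →
    ret ++ pvWalk (PySem.Set.ofList pcs) fuel frontier seen b
      = pvLoopA pcs b.toNat frontier ret := by
  intro fuel
  induction fuel with
  | zero => intro b frontier ret seen _ hf; exact absurd hf (by omega)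
  | succ f ih =>
    intro b frontier ret seen hv hf
    by_cases hb : b ≤ 0
    · have h0 : b.toNat = 0 := by omega
      simp [pvWalk, hb, h0, pvLoopA]
    · by_cases hfr : frontier = []
      · subst hfr
        rw [pvWalk_nil, List.append_nil, pvLoopA_nil]
      · have hguard : ¬ (b ≤ 0 ∨ frontier = []) := by tauto
        obtain ⟨i1, i2, i3⟩ := pvLevelAfter_eq pcs ret frontier [] seen
          (by intro x; simpa using hv x)
        have hbn : b.toNat = (b - 1).toNat + 1 := by omega
        simp only [pvWalk, pvLevelAfter]
        rw [if_neg hguard, hbn]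
        simp only [pvLoopA]
        set st := ((frontier.flatMap
          (fun c => (nearestCells c).filter (fun n => PySem.Set.contains (PySem.Set.ofList pcs) n))).foldl
          pvDedupStep ([], seen)) with hst
        rw [i1]
        by_cases hn : pvLevel pcs ret [] frontier = []
        · rw [hn, pvWalk_nil, pvLoopA_nil]
          simp
        · have hlen : 0 < (pvLevel pcs ret [] frontier).length := List.length_pos_iff.mpr hn
          rw [← List.append_assoc]
          apply ih
          · exact i2
          · simp only [List.length_nil, List.append_nil] at i3
            omega

-- ===== VERDICT (by name: the statement is the Claim_ definition above) =====
theorem possibleCellsForNotFlying_spec : Claim_equal_possibleCellsForNotFlying := by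
  unfold Claim_equal_possibleCellsForNotFlying
  intro pcs uc sp _ _
  unfold Spec_possibleCellsForNotFlying
  unfold possibleCellsForNotFlying possibleCellsForNotFlying_alt
  rw [pvA_eq_loop, PySem.List.length_pyRange_one]
  have hmain := pvMain pcs (pcs.length + 2) sp [uc] [uc] (PySem.Set.ofList [uc])
    (by intro x; rw [PySem.Set.mem_ofList])
    (by have := pvFree_le pcs [uc]; omega)
  have hsn : (sp - 0).toNat = sp.toNat := by omega
  rw [hsn, ← hmain]
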